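-- pv_equiv track=rewrite | github.com/madscatt/zazmol | src/python/test_sasmol/test_subset/test_unit_subset_Mask_get_dihedral_subset_mask.py | protein_expected_mask
-- ===== SOURCE A (Python) =====
-- def protein_expected_mask(flexible_residues, resids, names):
--     expected = []
--     for residue in flexible_residues:
--         row = []
--         for atom_resid, atom_name in zip(resids, names):
--             include = (
--                 (atom_resid == residue - 1 and atom_name == 'C') or
--                 (atom_resid == residue and atom_name in ['N', 'CA', 'C']) or
--                 (atom_resid == residue + 1 and atom_name == 'N')
--             )
--             row.append(1 if include else 0)
--         expected.append(row)
--     return expected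
-- ===== SOURCE B (Python) =====
-- def protein_expected_mask(flexible_residues, resids, names):
--     # Inverted index built in ONE pass over the atoms: residue value -> set of
--     # atom columns that activate it (a 'C' at column i activates residues r and
--     # r+1, an 'N' activates r-1 and r, a 'CA' activates r).  Each row is then a
--     # membership test of the column against the flexible residue's entry.
--     index = {}
--     n = 0
--     for r, nm in zip(resids, names):
--         if nm == 'C':
--             targets = (r, r + 1)
--         elif nm == 'N':
--             targets = (r - 1, r)
--         elif nm == 'CA':
--             targets = (r,)
--         else:
--             targets = ()
--         for t in targets:
--             index.setdefault(t, set()).add(n)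
--         n += 1
--     empty = set()
--     return [[1 if i in index.get(residue, empty) else 0 for i in range(n)]
--             for residue in flexible_residues]
-- ===== Notes on version B (the rewrite author's own statement) =====
-- stated objective: alternative
-- what changed: B inverts the computation: one pass over the atoms builds a dict mapping each residue value to the set of columns that activate it (C -> {r, r+1}, N -> {r-1, r}, CA -> {r}), and each flexible residue's row is then a per-column membership test against its single dict entry instead of A's per-(residue, atom) three-way condition over all atoms.
import Mathlib
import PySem

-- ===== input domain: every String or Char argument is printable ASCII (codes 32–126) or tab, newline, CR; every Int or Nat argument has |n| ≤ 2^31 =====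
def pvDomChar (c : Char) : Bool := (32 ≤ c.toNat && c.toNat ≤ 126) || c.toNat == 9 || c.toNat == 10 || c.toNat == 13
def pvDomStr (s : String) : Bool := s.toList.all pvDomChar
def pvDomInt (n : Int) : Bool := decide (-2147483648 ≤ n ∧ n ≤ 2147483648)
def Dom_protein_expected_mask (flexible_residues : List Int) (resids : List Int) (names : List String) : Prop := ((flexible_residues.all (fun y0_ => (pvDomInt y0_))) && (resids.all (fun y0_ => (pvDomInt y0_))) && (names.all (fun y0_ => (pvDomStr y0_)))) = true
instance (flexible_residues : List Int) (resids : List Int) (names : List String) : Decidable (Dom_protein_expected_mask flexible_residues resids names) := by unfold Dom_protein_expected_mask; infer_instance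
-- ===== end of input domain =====

-- B inverts A's per-(residue, atom) test: one pass over the atoms builds a dict
-- residue -> set of activating columns, and each row is a per-column membership test
-- against that residue's single entry (objective: alternative data structure, same cost).

-- ===== PORT A =====
def protein_expected_mask (flexible_residues : List Int) (resids : List Int) (names : List String) : List (List Int) :=
  flexible_residues.foldl (fun expected residue =>
    expected ++ [(resids.zip names).foldl (fun row p =>
      row ++ [if (p.1 == residue - 1 && p.2 == "C")
               || (p.1 == residue && (p.2 == "N" || p.2 == "CA" || p.2 == "C"))
               || (p.1 == residue + 1 && p.2 == "N") then (1 : Int) else 0]) []]) []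

-- ===== PORT B =====
-- the residues activated by an atom (Python's `targets` tuple)
def pvTargets (r : Int) (nm : String) : List Int :=
  if nm == "C" then [r, r + 1]
  else if nm == "N" then [r - 1, r]
  else if nm == "CA" then [r]
  else []

-- inner loop: `for t in targets: index.setdefault(t, set()).add(n)`
def pvAddTargets (d : PySem.Dict Int (PySem.Set Nat)) (ts : List Int) (i : Nat) : PySem.Dict Int (PySem.Set Nat) :=
  ts.foldl (fun d t => d.insert t (PySem.Set.add (d.getD t PySem.Set.empty) i)) d

-- outer loop over zip(resids, names) with the running column counter n
def pvBuild : List (Int × String) → Nat → PySem.Dict Int (PySem.Set Nat) → PySem.Dict Int (PySem.Set Nat)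
  | [], _, d => d
  | p :: rest, i, d => pvBuild rest (i + 1) (pvAddTargets d (pvTargets p.1 p.2) i)

def protein_expected_mask_alt (flexible_residues : List Int) (resids : List Int) (names : List String) : List (List Int) :=
  let l := resids.zip names
  let index := pvBuild l 0 PySem.Dict.empty
  flexible_residues.map (fun residue =>
    (List.range l.length).map (fun i =>
      if PySem.Set.contains (index.getD residue PySem.Set.empty) i then (1 : Int) else 0))

-- ===== PRECONDITION & SPEC =====
def Spec_protein_expected_mask (flexible_residues : List Int) (resids : List Int) (names : List String) (out : List (List Int)) : Prop := out = protein_expected_mask_alt flexible_residues resids names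
instance (flexible_residues : List Int) (resids : List Int) (names : List String) (out : List (List Int)) : Decidable (Spec_protein_expected_mask flexible_residues resids names out) := by unfold Spec_protein_expected_mask; infer_instance

-- ===== CLAIM (what is proved, stated in full; the proofs are below) =====
def Claim_equal_protein_expected_mask : Prop := ∀ (flexible_residues : List Int) (resids : List Int) (names : List String), Dom_protein_expected_mask flexible_residues resids names → Spec_protein_expected_mask flexible_residues resids names (protein_expected_mask flexible_residues resids names)

-- ===== LEMMAS AND PROOFS =====
theorem pvAddTargets_mem (ts : List Int) (d : PySem.Dict Int (PySem.Set Nat)) (i j : Nat) (q : Int) :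
    j ∈ (pvAddTargets d ts i).getD q PySem.Set.empty ↔
      j ∈ d.getD q PySem.Set.empty ∨ (j = i ∧ q ∈ ts) := by
  induction ts generalizing d with
  | nil => simp [pvAddTargets]
  | cons t ts ih =>
    simp only [pvAddTargets, List.foldl_cons] at *
    rw [ih]
    rw [PySem.Dict.getD_insert]
    by_cases hq : q = t
    · subst hq
      rw [if_pos rfl]
      simp only [PySem.Set.mem_add, List.mem_cons]
      tauto
    · simp only [if_neg hq, List.mem_cons]
      tauto

theorem pvBuild_mem (l : List (Int × String)) (i : Nat) (d : PySem.Dict Int (PySem.Set Nat)) (q : Int) (j : Nat) :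
    j ∈ (pvBuild l i d).getD q PySem.Set.empty ↔
      j ∈ d.getD q PySem.Set.empty ∨
        ∃ k, ∃ h : k < l.length, j = i + k ∧ q ∈ pvTargets l[k].1 l[k].2 := by
  induction l generalizing i d with
  | nil => simp [pvBuild]
  | cons p rest ih =>
    simp only [pvBuild]
    rw [ih, pvAddTargets_mem]
    constructor
    · rintro ((h | ⟨hj, hq⟩) | ⟨k, hk, hj, hq⟩)
      · exact Or.inl h
      · exact Or.inr ⟨0, by simp, by omega, hq⟩
      · exact Or.inr ⟨k + 1, by simpa using hk, by omega, by simpa using hq⟩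
    · rintro (h | ⟨k, hk, hj, hq⟩)
      · exact Or.inl (Or.inl h)
      · cases k with
        | zero => exact Or.inl (Or.inr ⟨by omega, by simpa using hq⟩)
        | succ k =>
          exact Or.inr ⟨k, by simpa using hk, by omega, by simpa using hq⟩

-- A's inclusion condition equals membership of `residue` in the atom's targets
theorem pvCond_eq_targets (residue r : Int) (nm : String) :
    ((r == residue - 1 && nm == "C")
      || (r == residue && (nm == "N" || nm == "CA" || nm == "C"))
      || (r == residue + 1 && nm == "N")) = true ↔ residue ∈ pvTargets r nm := by
  unfold pvTargets
  by_cases hC : nm = "C" <;> by_cases hN : nm = "N" <;> by_cases hA : nm = "CA" <;>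
    simp_all <;> omega

theorem pvRow_eq (residue : Int) (l : List (Int × String)) :
    (List.range l.length).map (fun i =>
        if PySem.Set.contains ((pvBuild l 0 PySem.Dict.empty).getD residue PySem.Set.empty) i
        then (1 : Int) else 0)
      = l.foldl (fun row p =>
          row ++ [if (p.1 == residue - 1 && p.2 == "C")
                   || (p.1 == residue && (p.2 == "N" || p.2 == "CA" || p.2 == "C"))
                   || (p.1 == residue + 1 && p.2 == "N") then (1 : Int) else 0]) [] := by
  rw [PySem.List.foldl_append_singleton_eq_map]
  simp only [List.nil_append]
  apply List.ext_getElem (by simp)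
  intro j h1 h2
  have hj : j < l.length := by simpa using h2
  simp only [List.getElem_map, List.getElem_range]
  refine if_congr ?_ rfl rfl
  rw [PySem.Set.contains_iff, pvBuild_mem, pvCond_eq_targets]
  simp only [PySem.Dict.getD_empty]
  constructor
  · rintro (h | ⟨k, hk, rfl, hq⟩)
    · simp [PySem.Set.empty] at h
    · simpa using hq
  · intro h; exact Or.inr ⟨j, hj, by omega, h⟩

-- ===== VERDICT (by name: the statement is the Claim_ definition above) =====
theorem protein_expected_mask_spec : Claim_equal_protein_expected_mask := by
  intro flexible_residues resids names _
  unfold Spec_protein_expected_mask protein_expected_mask protein_expected_mask_alt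
  rw [PySem.List.foldl_append_singleton_eq_map]
  simp only [List.nil_append]
  exact List.map_congr_left fun residue _ => (pvRow_eq residue (resids.zip names)).symm
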